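-- pv_equiv track=rewrite | github.com/ruchirK/python-differential | differential-collection.py | incremental_join
-- ===== SOURCE A (Python) =====
-- from collections import defaultdict
--
-- def collection_consolidate(a):
--     consolidated = defaultdict(int)
--     for (data, diff) in a:
--         consolidated[data] += diff
--     return [(data, diff) for (data, diff) in consolidated.items() if diff != 0]
--
-- def collection_concat(a, b):
--     out = []
--     out.extend(a)
--     out.extend(b)
--     return collection_consolidate(out)
--
-- def collection_join(a, b):
--    out = []
--    for ((k1, v1), d1) in a:
--        for ((k2, v2), d2) in b:
--            if k1 == k2:
--                out.append(((k1, (v1, v2)), d1 * d2))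
--    return collection_consolidate(out)
--
-- def incremental_join(deltas_a, deltas_b):
--     trace_a = defaultdict(list)
--     trace_b = defaultdict(list)
--     trace_out = {}
--     times = set()
--
--     for (time, delta) in deltas_a:
--         trace_a[time].extend(delta)
--         times.add(time)
--     for (time, delta) in deltas_b:
--         trace_b[time].extend(delta)
--         times.add(time)
--
--     times = [time for time in times]
--     times.sort()
--
--     curr_a = []
--     curr_b = []
--     for time in times:
--         delta_a = trace_a[time]
--         delta_b = trace_b[time]
--
--         a_delta_b = collection_join(curr_a, delta_b)
--         b_delta_a = collection_join(delta_a, curr_b)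
--         delta_a_delta_b = collection_join(delta_a, delta_b)
--
--         result = collection_concat(a_delta_b, collection_concat(b_delta_a, delta_a_delta_b))
--         trace_out[time] = result
--         curr_a = collection_concat(curr_a, delta_a)
--         curr_b = collection_concat(curr_b, delta_b)
--     return [(time, delta) for (time, delta) in trace_out.items()]
-- ===== SOURCE B (Python) =====
-- def incremental_join(deltas_a, deltas_b):
--     def consolidate(pairs):
--         order = []
--         totals = {}
--         for rec, d in pairs:
--             if rec in totals:
--                 totals[rec] += d
--             else:
--                 order.append(rec)
--                 totals[rec] = d
--         return [(rec, totals[rec]) for rec in order if totals[rec] != 0]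
--
--     def hash_join(a, b):
--         # index the right side by key once, then stream the left side
--         index = {}
--         for (k, v2), d2 in b:
--             index.setdefault(k, []).append((v2, d2))
--         return consolidate((((k, (v1, v2)), d1 * d2)
--                             for (k, v1), d1 in a
--                             for v2, d2 in index.get(k, ())))
--
--     def at_time(deltas, t):
--         return [rec for u, delta in deltas if u == t for rec in delta]
--
--     times = sorted({t for t, _ in deltas_a} | {t for t, _ in deltas_b})
--
--     out = []
--     curr_a = []
--     curr_b = []
--     for t in times:
--         da = at_time(deltas_a, t)
--         db = at_time(deltas_b, t)
--         inner = consolidate(hash_join(da, curr_b) + hash_join(da, db))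
--         out.append((t, consolidate(hash_join(curr_a, db) + inner)))
--         curr_a = consolidate(curr_a + da)
--         curr_b = consolidate(curr_b + db)
--     return out
-- ===== Notes on version B (the rewrite author's own statement) =====
-- stated objective: faster
-- what changed: Each O(n*m) nested-loop equi-join is replaced by a hash join (the right side indexed by key into a dict, the left side streamed against it), each time's delta is gathered by scanning the input streams instead of prebuilt trace dicts, consolidation keeps an explicit first-occurrence order list plus a totals dict, and per-time results are appended directly to the output list instead of going through a trace_out dict.
import Mathlib
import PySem

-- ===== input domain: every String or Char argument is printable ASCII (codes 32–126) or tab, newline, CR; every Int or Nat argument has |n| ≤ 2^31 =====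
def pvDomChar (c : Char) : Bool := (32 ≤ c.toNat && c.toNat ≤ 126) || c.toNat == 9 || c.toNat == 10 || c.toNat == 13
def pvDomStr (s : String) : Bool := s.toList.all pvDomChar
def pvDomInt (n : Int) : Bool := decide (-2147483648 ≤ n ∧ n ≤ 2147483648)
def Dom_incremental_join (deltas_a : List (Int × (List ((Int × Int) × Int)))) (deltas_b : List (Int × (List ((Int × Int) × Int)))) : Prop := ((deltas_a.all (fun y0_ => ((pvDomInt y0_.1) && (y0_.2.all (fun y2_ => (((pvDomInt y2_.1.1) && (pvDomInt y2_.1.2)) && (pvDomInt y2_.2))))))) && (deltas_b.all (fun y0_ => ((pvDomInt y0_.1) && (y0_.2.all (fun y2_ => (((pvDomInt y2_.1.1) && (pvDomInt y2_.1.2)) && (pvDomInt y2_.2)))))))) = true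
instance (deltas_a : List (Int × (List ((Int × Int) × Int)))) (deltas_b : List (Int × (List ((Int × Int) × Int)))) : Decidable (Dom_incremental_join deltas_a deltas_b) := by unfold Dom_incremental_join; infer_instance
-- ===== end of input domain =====

-- B replaces each nested-loop join by a hash join over a key index, gathers each time's delta by
-- scanning the input streams instead of prebuilt trace dicts, consolidates with an explicit
-- first-occurrence order list plus a totals dict, and appends results directly to the output list;
-- the return values agree exactly (neither version observably mutates its arguments).

-- ===== PORT A =====
-- collection_consolidate: defaultdict(int) accumulation, then keep nonzero diffs (insertion order)
def pvConsolidate {α : Type} [BEq α] (a : List (α × Int)) : List (α × Int) :=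
  ((a.foldl (fun d p => d.modify p.1 0 (· + p.2)) PySem.Dict.empty).items).filter (fun p => p.2 != 0)

-- collection_concat: out = a + b, consolidated
def pvConcat {α : Type} [BEq α] (a b : List (α × Int)) : List (α × Int) :=
  pvConsolidate (a ++ b)

-- collection_join: nested loops, append on key match
def pvJoinA (a b : List ((Int × Int) × Int)) : List ((Int × (Int × Int)) × Int) :=
  pvConsolidate (a.foldl (fun out p =>
    b.foldl (fun out2 q =>
      if p.1.1 == q.1.1 then out2 ++ [((p.1.1, (p.1.2, q.1.2)), p.2 * q.2)] else out2) out) [])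

def incremental_join (deltas_a : List (Int × (List ((Int × Int) × Int)))) (deltas_b : List (Int × (List ((Int × Int) × Int)))) : List (Int × (List ((Int × (Int × Int)) × Int))) :=
  -- the two accumulators of each Python loop (trace and times-set) are independent, so each is its own fold
  let trace_a : PySem.Dict Int (List ((Int × Int) × Int)) :=
    deltas_a.foldl (fun d p => d.modify p.1 [] (· ++ p.2)) PySem.Dict.empty
  let trace_b : PySem.Dict Int (List ((Int × Int) × Int)) :=
    deltas_b.foldl (fun d p => d.modify p.1 [] (· ++ p.2)) PySem.Dict.empty
  let times : PySem.Set Int :=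
    deltas_b.foldl (fun s p => PySem.Set.add s p.1)
      (deltas_a.foldl (fun s p => PySem.Set.add s p.1) PySem.Set.empty)
  -- '[t for t in times]' then .sort(): sorted without key, order-independent consumption of the set
  let timesSorted := PySem.List.sorted times (fun t => t) false
  -- state: (curr_a, curr_b, trace_out); trace_a[time] read as getD (the defaultdict's key insertion is unobservable in the result)
  let st := timesSorted.foldl (fun st t =>
      let delta_a := trace_a.getD t []
      let delta_b := trace_b.getD t []
      let result := pvConcat (pvJoinA st.1 delta_b) (pvConcat (pvJoinA delta_a st.2.1) (pvJoinA delta_a delta_b))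
      (pvConcat st.1 delta_a, pvConcat st.2.1 delta_b, st.2.2.insert t result))
    (([], [], PySem.Dict.empty) : List ((Int × Int) × Int) × List ((Int × Int) × Int) × PySem.Dict Int (List ((Int × (Int × Int)) × Int)))
  st.2.2.items

-- ===== PORT B =====
-- consolidate: explicit first-occurrence 'order' list + 'totals' dict, then one comprehension
def consolidateB {α : Type} [BEq α] (pairs : List (α × Int)) : List (α × Int) :=
  let st := pairs.foldl (fun st p =>
      if st.2.contains p.1 then (st.1, st.2.insert p.1 (st.2.getD p.1 0 + p.2))
      else (st.1 ++ [p.1], st.2.insert p.1 p.2))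
    (([], PySem.Dict.empty) : List α × PySem.Dict α Int)
  (st.1.filter (fun rec => st.2.getD rec 0 != 0)).map (fun rec => (rec, st.2.getD rec 0))

-- hash_join: index the right side by key once, then stream the left side (a comprehension)
def hashJoinB (a b : List ((Int × Int) × Int)) : List ((Int × (Int × Int)) × Int) :=
  let index : PySem.Dict Int (List (Int × Int)) :=
    b.foldl (fun d q => d.modify q.1.1 [] (· ++ [(q.1.2, q.2)])) PySem.Dict.empty
  consolidateB (a.flatMap (fun p =>
    (index.getD p.1.1 []).map (fun r => ((p.1.1, (p.1.2, r.1)), p.2 * r.2))))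

-- at_time: gather a time's delta by scanning the input stream
def atTimeB (deltas : List (Int × (List ((Int × Int) × Int)))) (t : Int) : List ((Int × Int) × Int) :=
  (deltas.filter (fun p => p.1 == t)).flatMap (fun p => p.2)

def incremental_join_alt (deltas_a : List (Int × (List ((Int × Int) × Int)))) (deltas_b : List (Int × (List ((Int × Int) × Int)))) : List (Int × (List ((Int × (Int × Int)) × Int))) :=
  -- sorted({t for t,_ in deltas_a} | {t for t,_ in deltas_b})
  let times := PySem.List.sorted
    (PySem.Set.union (PySem.Set.ofList (deltas_a.map (·.1))) (PySem.Set.ofList (deltas_b.map (·.1))))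
    (fun t => t) false
  -- state: (out, curr_a, curr_b); results are appended directly to the output list
  let st := times.foldl (fun st t =>
      let da := atTimeB deltas_a t
      let db := atTimeB deltas_b t
      let inner := consolidateB (hashJoinB da st.2.2 ++ hashJoinB da db)
      (st.1 ++ [(t, consolidateB (hashJoinB st.2.1 db ++ inner))],
       consolidateB (st.2.1 ++ da), consolidateB (st.2.2 ++ db)))
    (([], [], []) : List (Int × (List ((Int × (Int × Int)) × Int))) × List ((Int × Int) × Int) × List ((Int × Int) × Int))
  st.1

-- ===== PRECONDITION & SPEC =====
def Spec_incremental_join (deltas_a : List (Int × (List ((Int × Int) × Int)))) (deltas_b : List (Int × (List ((Int × Int) × Int)))) (out : List (Int × (List ((Int × (Int × Int)) × Int)))) : Prop := out = incremental_join_alt deltas_a deltas_b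
instance (deltas_a : List (Int × (List ((Int × Int) × Int)))) (deltas_b : List (Int × (List ((Int × Int) × Int)))) (out : List (Int × (List ((Int × (Int × Int)) × Int)))) : Decidable (Spec_incremental_join deltas_a deltas_b out) := by unfold Spec_incremental_join; infer_instance

-- ===== CLAIM (what is proved, stated in full; the proofs are below) =====
def Claim_equal_incremental_join : Prop := ∀ (deltas_a : List (Int × (List ((Int × Int) × Int)))) (deltas_b : List (Int × (List ((Int × Int) × Int)))), Dom_incremental_join deltas_a deltas_b → Spec_incremental_join deltas_a deltas_b (incremental_join deltas_a deltas_b)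

-- ===== LEMMAS AND PROOFS =====

-- B's (order, totals) consolidation state is (keys, dict) of A's defaultdict fold
lemma consB_fold {α : Type} [BEq α] [LawfulBEq α] (l : List (α × Int)) (d : PySem.Dict α Int) :
    l.foldl (fun st p =>
      if st.2.contains p.1 then (st.1, st.2.insert p.1 (st.2.getD p.1 0 + p.2))
      else (st.1 ++ [p.1], st.2.insert p.1 p.2)) (d.keys, d)
    = ((l.foldl (fun d p => d.modify p.1 0 (· + p.2)) d).keys,
       l.foldl (fun d p => d.modify p.1 0 (· + p.2)) d) := by
  induction l generalizing d with
  | nil => rfl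
  | cons p l ih =>
    simp only [List.foldl_cons]
    have hmod : d.modify p.1 0 (· + p.2) = d.insert p.1 (d.getD p.1 0 + p.2) := rfl
    by_cases h : d.contains p.1 = true
    · have hkeys : (d.insert p.1 (d.getD p.1 0 + p.2)).keys = d.keys :=
        PySem.Dict.keys_insert_of_contains d _ h
      rw [if_pos h, hmod, ← hkeys]
      exact ih _
    · have hfalse : d.contains p.1 = false := by simpa using h
      have hget : d.getD p.1 0 = 0 := PySem.Dict.getD_of_not_contains d 0 hfalse
      have hkeys : (d.insert p.1 (d.getD p.1 0 + p.2)).keys = d.keys ++ [p.1] :=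
        PySem.Dict.keys_insert_of_not_contains d _ hfalse
      rw [if_neg h, hmod, hget, zero_add, ← hget, ← hkeys, hget, zero_add]
      exact ih _

lemma consolidateB_eq {α : Type} [BEq α] [LawfulBEq α] (l : List (α × Int)) :
    consolidateB l = pvConsolidate l := by
  unfold consolidateB pvConsolidate
  have h0 : (([], PySem.Dict.empty) : List α × PySem.Dict α Int)
      = ((PySem.Dict.empty : PySem.Dict α Int).keys, PySem.Dict.empty) := by
    rw [PySem.Dict.keys_empty]
  rw [h0, consB_fold]
  have hnd : (l.foldl (fun d p => d.modify p.1 0 (· + p.2))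
      (PySem.Dict.empty : PySem.Dict α Int)).keys.Nodup := by
    have := PySem.Dict.nodup_keys_foldl_modify_key l (·.1) 0
      (fun _ p x => x + p.2) (PySem.Dict.empty : PySem.Dict α Int)
      (by rw [PySem.Dict.keys_empty]; exact List.nodup_nil)
    simpa using this
  rw [PySem.Dict.items_eq_map_keys _ hnd 0, List.filter_map]
  rfl

-- the hash join computes A's nested-loop join
lemma filter_key_comm (b : List ((Int × Int) × Int)) (c : Int) :
    b.filter (fun q => q.1.1 == c) = b.filter (fun q => c == q.1.1) := by
  apply List.filter_congr
  intro q _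
  exact BEq.comm

lemma hashJoin_eq_joinA (a b : List ((Int × Int) × Int)) : hashJoinB a b = pvJoinA a b := by
  unfold hashJoinB pvJoinA
  simp only []
  rw [consolidateB_eq]
  have hmap : b.foldl (fun d q => d.modify q.1.1 [] (· ++ [(q.1.2, q.2)]))
        (PySem.Dict.empty : PySem.Dict Int (List (Int × Int)))
      = (b.map (fun q => (q.1.1, (q.1.2, q.2)))).foldl
          (fun d (p : Int × (Int × Int)) => d.modify p.1 [] (· ++ [p.2])) PySem.Dict.empty :=
    (List.foldl_map (f := fun q : (Int × Int) × Int => (q.1.1, (q.1.2, q.2)))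
      (g := fun d (p : Int × (Int × Int)) => d.modify p.1 [] (· ++ [p.2]))
      (l := b) (init := PySem.Dict.empty)).symm
  have hidx : ∀ c : Int,
      (b.foldl (fun d q => d.modify q.1.1 [] (· ++ [(q.1.2, q.2)]))
        (PySem.Dict.empty : PySem.Dict Int (List (Int × Int)))).getD c []
      = (b.filter (fun q => c == q.1.1)).map (fun q => (q.1.2, q.2)) := by
    intro c
    rw [hmap, PySem.Dict.getD_foldl_modify_append, ← filter_key_comm]
    simp [List.filter_map, Function.comp_def]
  have hA : ∀ (p : (Int × Int) × Int) (out : List ((Int × (Int × Int)) × Int)),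
      b.foldl (fun out2 q =>
        if p.1.1 == q.1.1 then out2 ++ [((p.1.1, (p.1.2, q.1.2)), p.2 * q.2)] else out2) out
      = out ++ (b.filter (fun q => p.1.1 == q.1.1)).map
          (fun q => ((p.1.1, (p.1.2, q.1.2)), p.2 * q.2)) := fun p out =>
    PySem.List.foldl_append_if _ _ _ _
  congr 1
  rw [PySem.List.foldl_congr_mem' a _
      (fun out p => out ++ (b.filter (fun q => p.1.1 == q.1.1)).map
        (fun q => ((p.1.1, (p.1.2, q.1.2)), p.2 * q.2))) [] (fun p _ out => hA p out),
    PySem.List.foldl_append_eq_flatMap]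
  simp only [List.nil_append, hidx, List.map_map]
  rfl

-- gathering a time's delta by scanning the stream reads A's trace dict
lemma atTime_fold (deltas : List (Int × (List ((Int × Int) × Int))))
    (d : PySem.Dict Int (List ((Int × Int) × Int))) (t : Int) :
    (deltas.foldl (fun d p => d.modify p.1 [] (· ++ p.2)) d).getD t []
    = d.getD t [] ++ atTimeB deltas t := by
  induction deltas generalizing d with
  | nil => simp [atTimeB]
  | cons p l ih =>
    simp only [List.foldl_cons]
    rw [ih]
    unfold atTimeB
    by_cases h : p.1 = t
    · have hb : (p.1 == t) = true := by simp [h]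
      rw [List.filter_cons, if_pos hb, List.flatMap_cons]
      have : (d.modify p.1 [] (· ++ p.2)).getD t [] = d.getD t [] ++ p.2 := by
        rw [show (d.modify p.1 [] (· ++ p.2)).getD t [] =
            if t = p.1 then d.getD p.1 [] ++ p.2 else d.getD t [] from
          PySem.Dict.getD_modify d p.1 t [] (· ++ p.2), if_pos h.symm, h]
      rw [this, List.append_assoc]
    · have hb : ¬ ((p.1 == t) = true) := by simp [h]
      rw [List.filter_cons, if_neg hb]
      have : (d.modify p.1 [] (· ++ p.2)).getD t [] = d.getD t [] := by
        rw [show (d.modify p.1 [] (· ++ p.2)).getD t [] =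
            if t = p.1 then d.getD p.1 [] ++ p.2 else d.getD t [] from
          PySem.Dict.getD_modify d p.1 t [] (· ++ p.2), if_neg (fun hh => h hh.symm)]
      rw [this]

lemma atTime_eq (deltas : List (Int × (List ((Int × Int) × Int)))) (t : Int) :
    atTimeB deltas t
    = (deltas.foldl (fun d p => d.modify p.1 [] (· ++ p.2))
        (PySem.Dict.empty : PySem.Dict Int (List ((Int × Int) × Int)))).getD t [] := by
  rw [atTime_fold, PySem.Dict.getD_empty, List.nil_append]

-- consolidating a concatenation is A's collection_concat
lemma consolidate_append_eq_concat {α : Type} [BEq α] [LawfulBEq α] (x y : List (α × Int)) :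
    consolidateB (x ++ y) = pvConcat x y := by
  rw [consolidateB_eq]; rfl

-- both time lists are the sorted set of times occurring in the two delta streams
lemma times_eqB (da db : List (Int × (List ((Int × Int) × Int)))) :
    PySem.List.sorted
      (PySem.Set.union (PySem.Set.ofList (da.map (·.1))) (PySem.Set.ofList (db.map (·.1))))
      (fun t => t) false
    = PySem.List.sorted
      (db.foldl (fun s p => PySem.Set.add s p.1)
        (da.foldl (fun s p => PySem.Set.add s p.1) PySem.Set.empty))
      (fun t => t) false := by
  have rhsSet : db.foldl (fun s p => PySem.Set.add s p.1)
        (da.foldl (fun s p => PySem.Set.add s p.1) PySem.Set.empty)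
      = PySem.Set.update (PySem.Set.ofList (da.map (·.1))) (db.map (·.1)) := by
    rw [show PySem.Set.update (PySem.Set.ofList (da.map (·.1))) (db.map (·.1))
          = (db.map (·.1)).foldl PySem.Set.add (PySem.Set.ofList (da.map (·.1))) from rfl,
        show PySem.Set.ofList (da.map (·.1)) = (da.map (·.1)).foldl PySem.Set.add [] from rfl,
        List.foldl_map, List.foldl_map]
    rfl
  rw [rhsSet]
  apply PySem.List.sorted_eq_sorted_of_perm _ _ _ (fun _ _ h => h)
  rw [List.perm_ext_iff_of_nodup]
  · intro x
    show x ∈ PySem.Set.update (PySem.Set.ofList (da.map (·.1))) (PySem.Set.ofList (db.map (·.1))) ↔ _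
    simp [PySem.Set.mem_update, PySem.Set.mem_ofList]
  · exact PySem.Set.nodup_update _ _ (PySem.Set.nodup_ofList _)
  · exact PySem.Set.nodup_update _ _ (PySem.Set.nodup_ofList _)

-- the main loops agree: A's trace_out items are exactly B's appended output
lemma main_fold_eq (trA trB : PySem.Dict Int (List ((Int × Int) × Int)))
    (ts : List Int) (ca cb : List ((Int × Int) × Int))
    (d : PySem.Dict Int (List ((Int × (Int × Int)) × Int)))
    (hn : ts.Nodup) (hf : ∀ t ∈ ts, d.contains t = false) :
    (ts.foldl (fun st t =>
      let delta_a := trA.getD t []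
      let delta_b := trB.getD t []
      let result := pvConcat (pvJoinA st.1 delta_b) (pvConcat (pvJoinA delta_a st.2.1) (pvJoinA delta_a delta_b))
      (pvConcat st.1 delta_a, pvConcat st.2.1 delta_b, st.2.2.insert t result))
      (ca, cb, d)).2.2.items
    = (ts.foldl (fun st t =>
      let da := trA.getD t []
      let db := trB.getD t []
      let inner := pvConcat (pvJoinA da st.2.2) (pvJoinA da db)
      (st.1 ++ [(t, pvConcat (pvJoinA st.2.1 db) inner)], pvConcat st.2.1 da, pvConcat st.2.2 db))
      (d.items, ca, cb)).1 := by
  induction ts generalizing ca cb d with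
  | nil => rfl
  | cons t ts ih =>
    simp only [List.foldl_cons]
    rw [show d.items ++ [(t, pvConcat (pvJoinA ca (trB.getD t []))
          (pvConcat (pvJoinA (trA.getD t []) cb) (pvJoinA (trA.getD t []) (trB.getD t []))))]
        = (d.insert t (pvConcat (pvJoinA ca (trB.getD t []))
          (pvConcat (pvJoinA (trA.getD t []) cb) (pvJoinA (trA.getD t []) (trB.getD t []))))).items from
      (PySem.Dict.items_insert_of_not_contains d _ (hf t List.mem_cons_self)).symm]
    exact ih _ _ _ hn.of_cons (fun t' ht' => by
      rw [PySem.Dict.contains_insert]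
      have hne : t' ≠ t := fun h => (List.nodup_cons.mp hn).1 (h ▸ ht')
      simp [hne, hf t' (List.mem_cons_of_mem _ ht')])

-- ===== VERDICT (by name: the statement is the Claim_ definition above) =====
theorem incremental_join_spec : Claim_equal_incremental_join := by
  intro da db _
  show incremental_join da db = incremental_join_alt da db
  unfold incremental_join incremental_join_alt
  simp only []
  rw [times_eqB]
  simp only [atTime_eq, hashJoin_eq_joinA, consolidate_append_eq_concat]
  have hnd : (PySem.List.sorted
      (db.foldl (fun s p => PySem.Set.add s p.1)
        (da.foldl (fun s p => PySem.Set.add s p.1) PySem.Set.empty)) (fun t : Int => t) false).Nodup := by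
    have hset : (db.foldl (fun s p => PySem.Set.add s p.1)
          (da.foldl (fun s p => PySem.Set.add s p.1) PySem.Set.empty))
        = PySem.Set.update (PySem.Set.update ([] : PySem.Set Int) (da.map (·.1))) (db.map (·.1)) := by
      rw [show PySem.Set.update (PySem.Set.update ([] : PySem.Set Int) (da.map (·.1))) (db.map (·.1))
            = (db.map (·.1)).foldl PySem.Set.add ((da.map (·.1)).foldl PySem.Set.add []) from rfl,
          List.foldl_map, List.foldl_map]
      rfl
    refine List.Perm.nodup (PySem.List.sorted_perm
      (db.foldl (fun s p => PySem.Set.add s p.1)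
        (da.foldl (fun s p => PySem.Set.add s p.1) PySem.Set.empty)) (fun t : Int => t) false).symm ?_
    rw [hset]
    exact PySem.Set.nodup_update _ _ (PySem.Set.nodup_update _ _ List.nodup_nil)
  rw [show ([] : List (Int × (List ((Int × (Int × Int)) × Int))))
        = (PySem.Dict.empty : PySem.Dict Int (List ((Int × (Int × Int)) × Int))).items from rfl]
  exact main_fold_eq _ _ _ [] [] _ hnd (fun t _ => PySem.Dict.contains_empty t)
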